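-- pv_equiv track=rewrite | github.com/ooici/marine-integrations | mi/instrument/uw/hpies/crclib.py | crc3kerm
-- ===== SOURCE A (Python) =====
-- def crc3kerm(buf):
--     crcta = [0, 4225, 8450, 12675, 16900, 21125, 25350, 29575, \
--              33800, 38025, 42250, 46475, 50700, 54925, 59150, 63375]
--     crctb = [0, 4489, 8978, 12955, 17956, 22445, 25910, 29887, \
--              35912, 40385, 44890, 48851, 51820, 56293, 59774, 63735]
--     crc = 0
--     for i in range(0, len(buf)):
--         c = crc ^ ord(buf[i])
--         hi4 = (c & 240) >> 4
--         lo4 = c & 15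
--         crc = (crc >> 8) ^ (crcta[hi4] ^ crctb[lo4])
--     return crc
-- ===== SOURCE B (Python) =====
-- def crc3kerm(buf):
--     crc = 0
--     for ch in buf:
--         crc ^= ord(ch) & 0xFF
--         for _ in range(8):
--             crc = (crc >> 1) ^ 0x8408 if crc & 1 else crc >> 1
--     return crc
-- ===== Notes on version B (the rewrite author's own statement) =====
-- stated objective: simpler
-- what changed: Replaced the two 16-entry nibble lookup tables with the standard bit-by-bit Kermit CRC: xor the byte into the register, then eight shift/conditional-xor steps with polynomial 0x8408.
import Mathlib
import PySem

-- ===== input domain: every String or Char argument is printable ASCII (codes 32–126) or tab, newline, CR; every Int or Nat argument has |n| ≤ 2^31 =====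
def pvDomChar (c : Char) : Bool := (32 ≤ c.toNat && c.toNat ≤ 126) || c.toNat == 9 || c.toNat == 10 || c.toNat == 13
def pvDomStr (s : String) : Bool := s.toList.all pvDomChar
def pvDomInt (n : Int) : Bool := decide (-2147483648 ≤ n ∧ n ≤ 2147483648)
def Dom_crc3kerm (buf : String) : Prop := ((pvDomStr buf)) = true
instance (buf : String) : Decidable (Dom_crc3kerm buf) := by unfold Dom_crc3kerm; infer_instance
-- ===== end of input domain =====

-- B replaces A's two 16-entry nibble lookup tables with the standard bit-by-bit Kermit CRC
-- (poly 0x8408, eight shift/conditional-xor steps per byte); objective: simpler.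
-- Python ints here are always nonnegative (< 2^16), so both ports compute over Nat and cast
-- to Int at the end; this is exact.

-- ===== PORT A =====
def crctaL : List Nat := [0, 4225, 8450, 12675, 16900, 21125, 25350, 29575,
  33800, 38025, 42250, 46475, 50700, 54925, 59150, 63375]
def crctbL : List Nat := [0, 4489, 8978, 12955, 17956, 22445, 25910, 29887,
  35912, 40385, 44890, 48851, 51820, 56293, 59774, 63735]

def crcAStep (crc : Nat) (b : Nat) : Nat :=
  let c := crc ^^^ b
  let hi4 := (c &&& 240) >>> 4
  let lo4 := c &&& 15
  (crc >>> 8) ^^^ (crctaL.getD hi4 0 ^^^ crctbL.getD lo4 0)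

def crc3kerm (buf : String) : Int :=
  ((buf.toList.foldl (fun crc ch => crcAStep crc ch.toNat) 0 : Nat) : Int)

-- ===== PORT B =====
def bitStep (crc : Nat) : Nat :=
  if crc &&& 1 = 1 then (crc >>> 1) ^^^ 0x8408 else crc >>> 1

def crcBStep (crc : Nat) (b : Nat) : Nat :=
  (List.range 8).foldl (fun c _ => bitStep c) (crc ^^^ (b &&& 0xFF))

def crc3kerm_alt (buf : String) : Int :=
  ((buf.toList.foldl (fun crc ch => crcBStep crc ch.toNat) 0 : Nat) : Int)

-- ===== PRECONDITION & SPEC =====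
def Spec_crc3kerm (buf : String) (out : Int) : Prop := out = crc3kerm_alt buf
instance (buf : String) (out : Int) : Decidable (Spec_crc3kerm buf out) := by unfold Spec_crc3kerm; infer_instance

-- ===== CLAIM (what is proved, stated in full; the proofs are below) =====
def Claim_equal_crc3kerm : Prop := ∀ (buf : String), Dom_crc3kerm buf → Spec_crc3kerm buf (crc3kerm buf)

-- ===== LEMMAS AND PROOFS =====

theorem and255_eq_mod (x : Nat) : x &&& 255 = x % 256 := by
  have := Nat.and_two_pow_sub_one_eq_mod x 8
  norm_num at this
  exact this

theorem xor16 {a b : Nat} (ha : a < 65536) (hb : b < 65536) : a ^^^ b < 65536 := by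
  have h := Nat.xor_lt_two_pow (n := 16) (show a < 2 ^ 16 by omega) (show b < 2 ^ 16 by omega)
  have e : (2 : Nat) ^ 16 = 65536 := by norm_num
  rw [e] at h
  exact h

-- one bit-step is xor-linear in the CRC register
theorem bitStep_xor (a b : Nat) : bitStep (a ^^^ b) = bitStep a ^^^ bitStep b := by
  have hx : (a ^^^ b) &&& 1 = (a &&& 1) ^^^ (b &&& 1) := Nat.and_xor_distrib_right ..
  have hs : (a ^^^ b) >>> 1 = a >>> 1 ^^^ b >>> 1 := Nat.shiftRight_xor_distrib ..
  simp only [Nat.and_one_is_mod] at hx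
  rcases Nat.mod_two_eq_zero_or_one a with h1 | h1 <;>
    rcases Nat.mod_two_eq_zero_or_one b with h2 | h2 <;>
      simp [bitStep, Nat.and_one_is_mod, h1, h2, hx, hs, Nat.xor_assoc,
        Nat.xor_left_comm, Nat.xor_comm, Nat.xor_self]

theorem it8_eq (x : Nat) : (List.range 8).foldl (fun c _ => bitStep c) x
    = bitStep (bitStep (bitStep (bitStep (bitStep (bitStep (bitStep (bitStep x))))))) := rfl

theorem it8_xor (a b : Nat) :
    (List.range 8).foldl (fun c _ => bitStep c) (a ^^^ b)
      = (List.range 8).foldl (fun c _ => bitStep c) a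
          ^^^ (List.range 8).foldl (fun c _ => bitStep c) b := by
  simp only [it8_eq, bitStep_xor]

-- eight bit-steps move the high byte down unchanged …
set_option maxRecDepth 4000 in
theorem it8_hi : ∀ h ∈ List.range 256,
    (List.range 8).foldl (fun c _ => bitStep c) (h <<< 8) = h := by decide

-- … and act on the low byte exactly as A's pair of nibble tables
set_option maxRecDepth 4000 in
theorem it8_lo : ∀ l ∈ List.range 256,
    (List.range 8).foldl (fun c _ => bitStep c) l
      = crctaL.getD ((l &&& 240) >>> 4) 0 ^^^ crctbL.getD (l &&& 15) 0 := by decide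

theorem split16 (x : Nat) : ((x >>> 8) <<< 8) ^^^ (x &&& 255) = x := by
  apply Nat.eq_of_testBit_eq
  intro i
  have h255 : Nat.testBit 255 i = decide (i < 8) := by
    have := Nat.testBit_two_pow_sub_one (n := 8) (i := i); norm_num at this ⊢; exact this
  by_cases h : i < 8
  · simp [Nat.testBit_xor, Nat.testBit_shiftLeft, Nat.testBit_and, h255, h,
      show ¬ (8 ≤ i) by omega]
  · simp [Nat.testBit_xor, Nat.testBit_shiftLeft, Nat.testBit_shiftRight, Nat.testBit_and, h255, h,
      show (8 ≤ i) by omega, show 8 + (i - 8) = i by omega]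

theorem step_eq (crc b : Nat) (hc : crc < 65536) (hb : b < 128) :
    crcAStep crc b = crcBStep crc b := by
  have hb' : b &&& 255 = b := by rw [and255_eq_mod]; omega
  have hx : crc ^^^ b < 65536 := xor16 hc (by omega)
  have hhi : (crc ^^^ b) >>> 8 < 256 := by omega
  have hlo : (crc ^^^ b) &&& 255 < 256 := by rw [and255_eq_mod]; omega
  have h1 := it8_hi ((crc ^^^ b) >>> 8) (by simpa [List.mem_range] using hhi)
  have h2 := it8_lo ((crc ^^^ b) &&& 255) (by simpa [List.mem_range] using hlo)
  have hm240 : ((crc ^^^ b) &&& 255) &&& 240 = (crc ^^^ b) &&& 240 := by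
    rw [Nat.and_assoc, show (255 &&& 240 : Nat) = 240 from rfl]
  have hm15 : ((crc ^^^ b) &&& 255) &&& 15 = (crc ^^^ b) &&& 15 := by
    rw [Nat.and_assoc, show (255 &&& 15 : Nat) = 15 from rfl]
  have hshift : (crc ^^^ b) >>> 8 = crc >>> 8 := by
    have hd : (crc ^^^ b) >>> 8 = (crc >>> 8) ^^^ (b >>> 8) := Nat.shiftRight_xor_distrib ..
    have hb8 : b >>> 8 = 0 := by omega
    simp [hd, hb8]
  calc crcAStep crc b
      = ((crc ^^^ b) >>> 8) ^^^
          (crctaL.getD (((crc ^^^ b) &&& 240) >>> 4) 0 ^^^ crctbL.getD ((crc ^^^ b) &&& 15) 0) := by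
        simp only [crcAStep, hshift]
    _ = (List.range 8).foldl (fun c _ => bitStep c)
          ((((crc ^^^ b) >>> 8) <<< 8) ^^^ ((crc ^^^ b) &&& 255)) := by
        rw [it8_xor, h1, h2, hm240, hm15]
    _ = crcBStep crc b := by rw [split16]; simp only [crcBStep, hb']

theorem ta_lt (i : Nat) (h : i < 16) : crctaL.getD i 0 < 65536 := by
  interval_cases i <;> decide

theorem tb_lt (i : Nat) (h : i < 16) : crctbL.getD i 0 < 65536 := by
  interval_cases i <;> decide

theorem stepA_lt (crc b : Nat) (hc : crc < 65536) : crcAStep crc b < 65536 := by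
  have h240 : (crc ^^^ b) &&& 240 ≤ 240 := Nat.and_le_right
  have h15 : (crc ^^^ b) &&& 15 ≤ 15 := Nat.and_le_right
  unfold crcAStep
  exact xor16 (by omega) (xor16 (ta_lt _ (by omega)) (tb_lt _ (by omega)))

theorem fold_eq (cs : List Char) (crc : Nat) (hc : crc < 65536)
    (hdom : ∀ ch ∈ cs, pvDomChar ch = true) :
    cs.foldl (fun c ch => crcAStep c ch.toNat) crc
      = cs.foldl (fun c ch => crcBStep c ch.toNat) crc := by
  induction cs generalizing crc with
  | nil => rfl
  | cons ch cs ih =>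
    have hch : ch.toNat < 128 := by
      have := hdom ch (by simp)
      simp only [pvDomChar, Bool.or_eq_true, Bool.and_eq_true, beq_iff_eq,
        decide_eq_true_eq] at this
      omega
    have hs := step_eq crc ch.toNat hc hch
    simp only [List.foldl_cons, ← hs]
    exact ih _ (stepA_lt crc ch.toNat hc) (fun c hcmem => hdom c (by simp [hcmem]))

-- ===== VERDICT (by name: the statement is the Claim_ definition above) =====
theorem crc3kerm_spec : Claim_equal_crc3kerm := by
  intro buf hdom
  unfold Spec_crc3kerm crc3kerm crc3kerm_alt
  have hdom' : ∀ ch ∈ buf.toList, pvDomChar ch = true := by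
    simpa [Dom_crc3kerm, pvDomStr, List.all_eq_true] using hdom
  rw [fold_eq buf.toList 0 (by omega) hdom']
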